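-- pv_equiv track=rewrite | github.com/gibzyn/rinkwet | is_rink_wet.py | simplify_query
-- ===== SOURCE A (Python) =====
-- def simplify_query(q: str):
--     if not q:
--         return q
--     s = q.strip()
--     for ch in ["|", "\\", "#", "@"]:
--         s = s.replace(ch, " ")
--     s = " ".join(s.split())
--     return s
-- ===== SOURCE B (Python) =====
-- def simplify_query(q: str):
--     out = []
--     word = []
--     for c in q:
--         if c.isspace() or c in "|\\#@":
--             if word:
--                 out.append("".join(word))
--                 word = []
--         else:
--             word.append(c)
--     if word:
--         out.append("".join(word))
--     return " ".join(out)
-- ===== Notes on version B (the rewrite author's own statement) =====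
-- stated objective: alternative
-- what changed: Replaces the strip + four-pass replace + split/join pipeline with a single character-level scan that accumulates maximal runs of non-separator characters and joins them once.
import Mathlib
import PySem

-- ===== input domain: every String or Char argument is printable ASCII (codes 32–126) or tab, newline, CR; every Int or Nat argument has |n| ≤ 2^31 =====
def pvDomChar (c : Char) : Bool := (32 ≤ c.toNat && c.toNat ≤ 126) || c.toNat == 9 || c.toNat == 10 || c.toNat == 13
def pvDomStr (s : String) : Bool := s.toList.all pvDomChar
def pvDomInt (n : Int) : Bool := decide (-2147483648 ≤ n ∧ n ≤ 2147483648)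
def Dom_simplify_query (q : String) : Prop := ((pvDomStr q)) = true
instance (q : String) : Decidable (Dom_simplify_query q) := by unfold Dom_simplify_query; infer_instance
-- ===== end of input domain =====

-- B replaces A's strip + four replace passes + split/join pipeline with one
-- character scan that collects maximal runs of non-separator characters (alternative decomposition).


-- ===== PORT A =====
-- 'if not q: return q', then strip, the four replaces in a loop, then " ".join(s.split())
def simplify_query (q : String) : String :=
  if q = "" then q
  else
    let s := PySem.Chars.strip q.toList
    let s := [['|'], ['\\'], ['#'], ['@']].foldl (fun s ch => PySem.Chars.replace s ch [' ']) s
    String.ofList (PySem.Chars.join [' '] (PySem.Chars.split₀ s))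

-- ===== PORT B =====
-- separator test: c.isspace() or c in "|\#@"
def sqSep (c : Char) : Bool :=
  PySem.Chars.isspace c || (c == '|' || c == '\\' || c == '#' || c == '@')

-- one loop step over (out, word)
def sqStep : (List (List Char) × List Char) → Char → (List (List Char) × List Char)
  | (out, word), c =>
    if sqSep c then (if word.isEmpty then (out, []) else (out ++ [word], []))
    else (out, word ++ [c])

def simplify_query_alt (q : String) : String :=
  let r := q.toList.foldl sqStep ([], [])
  let out := if r.2.isEmpty then r.1 else r.1 ++ [r.2]
  String.ofList (PySem.Chars.join [' '] out)

-- ===== PRECONDITION & SPEC =====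
def Spec_simplify_query (q : String) (out : String) : Prop := out = simplify_query_alt q
instance (q : String) (out : String) : Decidable (Spec_simplify_query q out) := by unfold Spec_simplify_query; infer_instance

-- ===== CLAIM (what is proved, stated in full; the proofs are below) =====
def Claim_equal_simplify_query : Prop := ∀ (q : String), Dom_simplify_query q → Spec_simplify_query q (simplify_query q)

-- ===== LEMMAS AND PROOFS =====

-- spec tokenizer: maximal runs of non-separator chars (cur held reversed)
def sqTokens : List Char → List Char → List (List Char)
  | [], cur => if cur.isEmpty then [] else [cur.reverse]
  | c :: rest, cur =>
    if sqSep c then (if cur.isEmpty then sqTokens rest [] else cur.reverse :: sqTokens rest [])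
    else sqTokens rest (c :: cur)

-- single-char replace is a map
theorem sq_replace_go_single (c : Char) (s acc : List Char) (fuel : Nat) (h : s.length ≤ fuel) :
    PySem.Chars.replace.go [c] [' '] fuel s acc
      = acc.reverse ++ s.map (fun x => if x = c then ' ' else x) := by
  induction fuel generalizing s acc with
  | zero =>
    interval_cases hl : s.length
    simp at hl; subst hl
    simp [PySem.Chars.replace.go]
  | succ n ih =>
    cases s with
    | nil => simp [PySem.Chars.replace.go]
    | cons a t =>
      simp only [PySem.Chars.replace.go]
      by_cases hac : a = c
      · subst hac
        have : List.isPrefixOf [a] (a :: t) = true := by simp [List.isPrefixOf]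
        simp only [this]
        rw [ih _ _ (by simpa using Nat.le_of_succ_le_succ (by simpa using h))]
        simp
      · have : List.isPrefixOf [c] (a :: t) = false := by
          simp [List.isPrefixOf]; exact fun hh => (hac hh.symm).elim
        simp only [this]
        have ht : t.length ≤ n := by simpa using h
        rw [ih t (a :: acc) ht]
        simp [hac]

theorem sq_replace_single (c : Char) (s : List Char) :
    PySem.Chars.replace s [c] [' '] = s.map (fun x => if x = c then ' ' else x) := by
  simp [PySem.Chars.replace]
  rw [sq_replace_go_single c s [] s.length (le_refl _)]
  simp

-- the composed replacement map
def sqG (x : Char) : Char :=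
  if (if (if (if x = '|' then ' ' else x) = '\\' then ' '
        else (if x = '|' then ' ' else x)) = '#' then ' '
      else (if (if x = '|' then ' ' else x) = '\\' then ' '
        else (if x = '|' then ' ' else x))) = '@' then ' '
  else (if (if (if x = '|' then ' ' else x) = '\\' then ' '
        else (if x = '|' then ' ' else x)) = '#' then ' '
      else (if (if x = '|' then ' ' else x) = '\\' then ' '
        else (if x = '|' then ' ' else x)))

theorem sqG_isspace (c : Char) : PySem.Chars.isspace (sqG c) = sqSep c := by
  by_cases h1 : c = '|' <;> by_cases h2 : c = '\\' <;> by_cases h3 : c = '#' <;>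
    by_cases h4 : c = '@' <;>
  simp_all [sqG, sqSep, show PySem.Chars.isspace ' ' = true from by decide]

theorem sqG_id {c : Char} (h : sqSep c = false) : sqG c = c := by
  simp only [sqSep, Bool.or_eq_false_iff, beq_eq_false_iff_ne, ne_eq] at h
  obtain ⟨-, ⟨⟨h1, h2⟩, h3⟩, h4⟩ := h
  simp [sqG, h1, h2, h3, h4]

-- A's split of the replaced string = the spec tokenizer on the original chars
theorem sq_split_map (s cur : List Char) (acc : List (List Char)) :
    PySem.Chars.split₀.go (s.map sqG) cur acc
      = acc.reverse ++ sqTokens s cur := by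
  induction s generalizing cur acc with
  | nil => simp [PySem.Chars.split₀.go, sqTokens]; split <;> simp
  | cons c rest ih =>
    simp only [List.map_cons, PySem.Chars.split₀.go, sqG_isspace]
    by_cases hs : sqSep c
    · simp only [hs, sqTokens]
      by_cases hc : cur.isEmpty
      · simp [hc, ih]
      · simp only [hc, Bool.false_eq_true, if_false]
        rw [ih]
        simp
    · simp only [hs, Bool.false_eq_true, if_false, sqTokens, sqG_id (by simpa using hs)]
      exact ih _ _


-- leading whitespace is ignored by the tokenizer
theorem sq_lstrip (s : List Char) :
    sqTokens (List.dropWhile PySem.Chars.isspace s) [] = sqTokens s [] := by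
  induction s with
  | nil => rfl
  | cons c rest ih =>
    by_cases h : PySem.Chars.isspace c
    · have hs : sqSep c = true := by simp [sqSep, h]
      simp [List.dropWhile, h, sqTokens, hs, ih]
    · simp [List.dropWhile, h]

-- all-whitespace tails are ignored by the tokenizer
theorem sq_ws_nil (ws : List Char) (h : ∀ c ∈ ws, PySem.Chars.isspace c) :
    sqTokens ws [] = [] := by
  induction ws with
  | nil => rfl
  | cons c rest ih =>
    have hs : sqSep c = true := by simp [sqSep, h c (by simp)]
    simp [sqTokens, hs, ih (fun x hx => h x (by simp [hx]))]

theorem sq_rstrip (s ws : List Char) (h : ∀ c ∈ ws, PySem.Chars.isspace c) (cur : List Char) :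
    sqTokens (s ++ ws) cur = sqTokens s cur := by
  induction s generalizing cur with
  | nil =>
    simp only [List.nil_append]
    induction ws with
    | nil => rfl
    | cons c rest ih =>
      have hs : sqSep c = true := by simp [sqSep, h c (by simp)]
      have hrest : ∀ x ∈ rest, PySem.Chars.isspace x := fun x hx => h x (by simp [hx])
      by_cases hc : cur.isEmpty
      · simp [sqTokens, hs, hc, sq_ws_nil rest hrest]
      · simp [sqTokens, hs, hc, sq_ws_nil rest hrest]
  | cons c rest ih =>
    simp only [List.cons_append, sqTokens]
    by_cases hs : sqSep c <;> simp [hs, ih]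

-- B's loop computes the spec tokenizer
theorem sq_loop (s : List Char) (out : List (List Char)) (word : List Char) :
    (let r := s.foldl sqStep (out, word);
     if r.2.isEmpty then r.1 else r.1 ++ [r.2]) = out ++ sqTokens s word.reverse := by
  induction s generalizing out word with
  | nil =>
    by_cases h : word.isEmpty
    · have hw : word = [] := by simpa using h
      subst hw; simp [sqTokens]
    · have h' : word.reverse.isEmpty = false := by simp_all
      simp [sqTokens, h, h']
  | cons c rest ih =>
    simp only [List.foldl_cons, sqStep]
    by_cases hs : sqSep c
    · by_cases hw : word.isEmpty
      · have hw0 : word = [] := by simpa using hw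
        subst hw0
        have := ih out []
        simpa [sqTokens, hs, hw] using this
      · have h' : word.reverse.isEmpty = false := by simp_all
        simp only [hs, hw, Bool.false_eq_true, if_false, sqTokens, h']
        rw [ih]
        simp
    · simp only [hs, Bool.false_eq_true, if_false, sqTokens]
      rw [ih]
      simp

-- ===== VERDICT (by name: the statement is the Claim_ definition above) =====
theorem simplify_query_spec : Claim_equal_simplify_query := by
  intro q _
  show simplify_query q = simplify_query_alt q
  by_cases hq : q = ""
  · subst hq
    rfl
  · unfold simplify_query simplify_query_alt
    simp only [hq, if_false]
    rw [sq_loop q.toList [] []]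
    simp only [List.foldl_cons, List.foldl_nil,
      sq_replace_single, List.map_map]
    have hmap :
        ((fun x => if x = '@' then ' ' else x) ∘
          (fun x => if x = '#' then ' ' else x) ∘
            (fun x => if x = '\\' then ' ' else x) ∘ fun x => if x = '|' then ' ' else x) = sqG := by
      funext a
      rfl
    rw [hmap]
    unfold PySem.Chars.split₀
    rw [sq_split_map _ [] []]
    simp only [List.reverse_nil, List.nil_append]
    congr 2
    -- sqTokens (strip q.toList) [] = sqTokens q.toList []
    unfold PySem.Chars.strip
    have hr : PySem.Chars.rstrip (PySem.Chars.lstrip q.toList)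
        = List.rdropWhile PySem.Chars.isspace (PySem.Chars.lstrip q.toList) := rfl
    rw [hr]
    have hsplit : List.rdropWhile PySem.Chars.isspace (PySem.Chars.lstrip q.toList)
        ++ List.rtakeWhile PySem.Chars.isspace (PySem.Chars.lstrip q.toList)
        = PySem.Chars.lstrip q.toList := List.rdropWhile_append_rtakeWhile
    have := sq_rstrip (List.rdropWhile PySem.Chars.isspace (PySem.Chars.lstrip q.toList))
      (List.rtakeWhile PySem.Chars.isspace (PySem.Chars.lstrip q.toList))
      (fun c hc => List.mem_rtakeWhile_imp hc) []
    rw [← this, hsplit]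
    exact sq_lstrip q.toList
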